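-- pv_equiv track=rewrite | github.com/NatronGitHub/openfx-io | .github/workflows/find_and_copy_deps.py | get_all_deps_for_binary
-- ===== SOURCE A (Python) =====
-- def get_all_deps_for_binary(binary_key_name, json_dict):
--     if  binary_key_name not in json_dict["binary_deps"]:
--         return None
--
--     ret = set()
--     deps_list =  json_dict["binary_deps"][binary_key_name].copy()
--     while len(deps_list) > 0:
--         dep = deps_list.pop()
--         if dep not in ret:
--             ret.add(dep)
--             deps_list += json_dict["binary_deps"][dep]
--     return ret
-- ===== SOURCE B (Python) =====
-- def get_all_deps_for_binary(binary_key_name, json_dict):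
--     binary_deps = json_dict["binary_deps"]
--     if binary_key_name not in binary_deps:
--         return None
--
--     seen = set()
--
--     def visit(dep):
--         if dep not in seen:
--             seen.add(dep)
--             # reversed() keeps the visit order (and hence which missing
--             # dependency raises KeyError first) identical to the stack version
--             for child in reversed(binary_deps[dep]):
--                 visit(child)
--
--     for dep in reversed(binary_deps[binary_key_name]):
--         visit(dep)
--     return seen
-- ===== Notes on version B (the rewrite author's own statement) =====
-- stated objective: alternative
-- what changed: The iterative worklist (a flat list of pending nodes with the membership check at pop time) is replaced by a recursive depth-first traversal with a nested visit() helper that checks membership before expanding a node.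
-- outside the precondition, e.g. on get_all_deps_for_binary('a', {'binary_deps': {'a': [], 'b': ['c']}}): A returns set(), B returns set()
import Mathlib
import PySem

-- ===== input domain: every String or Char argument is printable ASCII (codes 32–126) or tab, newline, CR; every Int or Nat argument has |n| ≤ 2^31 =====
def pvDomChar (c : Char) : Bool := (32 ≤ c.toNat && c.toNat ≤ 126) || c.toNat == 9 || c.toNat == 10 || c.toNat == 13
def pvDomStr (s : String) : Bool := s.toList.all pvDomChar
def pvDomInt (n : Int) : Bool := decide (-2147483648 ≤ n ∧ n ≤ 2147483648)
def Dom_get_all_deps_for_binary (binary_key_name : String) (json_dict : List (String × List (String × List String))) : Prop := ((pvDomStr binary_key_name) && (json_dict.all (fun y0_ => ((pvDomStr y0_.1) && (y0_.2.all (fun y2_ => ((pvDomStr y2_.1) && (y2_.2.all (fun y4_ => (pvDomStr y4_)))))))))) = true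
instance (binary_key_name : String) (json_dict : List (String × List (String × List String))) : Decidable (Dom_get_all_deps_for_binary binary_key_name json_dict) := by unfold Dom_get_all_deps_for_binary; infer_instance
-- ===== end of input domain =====

-- B replaces A's iterative worklist by a recursive depth-first traversal (same cost; different decomposition).
-- Both programs return a Python set; equality proved here is on its insertion-order element list, which coincides.

-- number of dictionary keys not yet in the seen-set (termination measure for both ports)
def pvUnseen (bd : PySem.Dict String (List String)) (seen : List String) : Nat :=
  (bd.keys.filter (fun k => !(PySem.Set.contains seen k))).length

theorem pv_filter_lt (p q : String → Bool) (himp : ∀ x, q x = true → p x = true)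
    (d : String) (hp : p d = true) (hq : q d = false) :
    ∀ l : List String, d ∈ l → (l.filter q).length < (l.filter p).length := by
  intro l
  induction l with
  | nil => intro h; cases h
  | cons a t ih =>
    intro hmem
    have hle : (t.filter q).length ≤ (t.filter p).length := by
      rw [← List.countP_eq_length_filter, ← List.countP_eq_length_filter]
      exact List.countP_mono_left (fun x _ h => himp x h)
    rw [List.filter_cons, List.filter_cons]
    rcases List.mem_cons.mp hmem with rfl | hmem'
    · rw [hp, hq]; simp; omega
    · have hlt := ih hmem'
      by_cases hqa : q a = true
      · rw [hqa, himp a hqa]; simpa using hlt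
      · rw [Bool.not_eq_true] at hqa
        rw [hqa]
        by_cases hpa : p a = true
        · rw [hpa]; simp; omega
        · rw [Bool.not_eq_true] at hpa; rw [hpa]; simpa using hlt

theorem pvUnseen_add_lt (bd : PySem.Dict String (List String)) (seen : List String) (dep : String)
    (hk : dep ∈ bd.keys) (hc : PySem.Set.contains seen dep = false) :
    pvUnseen bd (PySem.Set.add seen dep) < pvUnseen bd seen := by
  have hnot : dep ∉ seen := by simpa [PySem.Set.contains] using hc
  unfold pvUnseen
  apply pv_filter_lt _ _ ?_ dep ?_ ?_ _ hk
  · intro x hx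
    have hadd : PySem.Set.add seen dep = seen ++ [dep] := by
      simp [PySem.Set.add, PySem.Set.contains, hnot]
    rw [hadd] at hx
    simp [PySem.Set.contains] at hx ⊢
    exact hx.1
  · simp [PySem.Set.contains, hnot]
  · have hadd : PySem.Set.add seen dep = seen ++ [dep] := by
      simp [PySem.Set.add, PySem.Set.contains, hnot]
    rw [hadd]; simp [PySem.Set.contains]

theorem pv_mem_keys_of_get? (bd : PySem.Dict String (List String)) (k : String) (v : List String)
    (h : bd.get? k = some v) : k ∈ bd.keys := by
  by_contra hk
  rw [← PySem.Dict.get?_eq_none_iff_not_mem_keys] at hk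
  rw [h] at hk
  cases hk

-- ===== PORT A =====
-- the while-loop of A: pop from the end of deps_list, skip if already collected, else collect and append its deps
def pvLoopA (bd : PySem.Dict String (List String)) (depsList : List String) (ret : PySem.Set String) : Option (List String) :=
  match hL : depsList.getLast? with
  | none => some ret
  | some dep =>
    if hc : PySem.Set.contains ret dep then pvLoopA bd depsList.dropLast ret
    else match hg : bd.get? dep with
      | none => none   -- Python raises KeyError here; excluded by Pre_
      | some ch => pvLoopA bd (depsList.dropLast ++ ch) (PySem.Set.add ret dep)
termination_by (pvUnseen bd ret, depsList.length)
decreasing_by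
  · exact Prod.Lex.right _ (by
      have : depsList ≠ [] := by intro h; subst h; simp at hL
      have := List.length_pos_iff.mpr this
      simp [List.length_dropLast]; omega)
  · exact Prod.Lex.left _ _ (pvUnseen_add_lt bd ret dep (pv_mem_keys_of_get? bd dep ch hg) (by simpa using hc))

def get_all_deps_for_binary (binary_key_name : String) (json_dict : List (String × List (String × List String))) : Option (List String) :=
  match (PySem.Dict.mk json_dict).get? "binary_deps" with
  | none => none   -- Python raises KeyError here; excluded by Pre_
  | some bdl =>
    match (PySem.Dict.mk bdl).get? binary_key_name with
    | none => none   -- Python: return None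
    | some init => pvLoopA (PySem.Dict.mk bdl) init PySem.Set.empty

-- ===== PORT B =====
-- recursive DFS: visit a node (skip if seen, else mark and recurse into its reversed children);
-- fuel only makes the recursion total in Lean: it exceeds the recursion depth on every input Pre_ admits
mutual
def pvVisitB (bd : PySem.Dict String (List String)) : Nat → String → PySem.Set String → Option (PySem.Set String)
  | 0, _, _ => none
  | f + 1, dep, seen =>
    if PySem.Set.contains seen dep then some seen
    else match bd.get? dep with
      | none => none   -- Python raises KeyError here; excluded by Pre_
      | some ch => pvGoB bd f ch.reverse (PySem.Set.add seen dep)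
termination_by f _ _ => (f, 0)

def pvGoB (bd : PySem.Dict String (List String)) : Nat → List String → PySem.Set String → Option (PySem.Set String)
  | _, [], seen => some seen
  | f, d :: ds, seen =>
    match pvVisitB bd f d seen with
    | none => none
    | some seen' => pvGoB bd f ds seen'
termination_by f l _ => (f, l.length + 1)
end

def get_all_deps_for_binary_alt (binary_key_name : String) (json_dict : List (String × List (String × List String))) : Option (List String) :=
  match (PySem.Dict.mk json_dict).get? "binary_deps" with
  | none => none
  | some bdl =>
    match (PySem.Dict.mk bdl).get? binary_key_name with
    | none => none
    | some init => pvGoB (PySem.Dict.mk bdl) (bdl.length + 1) init.reverse PySem.Set.empty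

-- ===== PRECONDITION & SPEC =====
-- Pre_ excludes the inputs on which A raises KeyError ("binary_deps" missing, or a visited dependency
-- absent from binary_deps); requiring EVERY listed dependency to be a key is slightly stronger than
-- "every reachable one", so it also excludes some inputs with unreachable dangling deps on which A
-- still returns (see claim.json cites) — B returns the same value there.
def pvPreB (binary_key_name : String) (json_dict : List (String × List (String × List String))) : Bool :=
  match (PySem.Dict.mk json_dict).get? "binary_deps" with
  | none => false
  | some bdl =>
    ((PySem.Dict.mk bdl).get? binary_key_name == none)
      || bdl.all (fun p => p.2.all (fun d => ((PySem.Dict.mk bdl).get? d).isSome))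

def Pre_get_all_deps_for_binary (binary_key_name : String) (json_dict : List (String × List (String × List String))) : Prop :=
  pvPreB binary_key_name json_dict = true
instance (binary_key_name : String) (json_dict : List (String × List (String × List String))) : Decidable (Pre_get_all_deps_for_binary binary_key_name json_dict) := by unfold Pre_get_all_deps_for_binary; infer_instance

def pvWitness_get_all_deps_for_binary : String × (List (String × List (String × List String))) :=
  ("x", [("binary_deps", [("x", ["y"]), ("y", [])])])

def Spec_get_all_deps_for_binary (binary_key_name : String) (json_dict : List (String × List (String × List String))) (out : Option (List String)) : Prop := out = get_all_deps_for_binary_alt binary_key_name json_dict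
instance (binary_key_name : String) (json_dict : List (String × List (String × List String))) (out : Option (List String)) : Decidable (Spec_get_all_deps_for_binary binary_key_name json_dict out) := by unfold Spec_get_all_deps_for_binary; infer_instance

-- ===== CLAIM (what is proved, stated in full; the proofs are below) =====
def Claim_equal_get_all_deps_for_binary : Prop := ∀ (binary_key_name : String) (json_dict : List (String × List (String × List String))), Dom_get_all_deps_for_binary binary_key_name json_dict → Pre_get_all_deps_for_binary binary_key_name json_dict → Spec_get_all_deps_for_binary binary_key_name json_dict (get_all_deps_for_binary binary_key_name json_dict)

-- ===== LEMMAS AND PROOFS =====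

-- Bridge: a successful recursive traversal of l (B) does exactly what A's worklist loop does
-- when l.reverse sits on top of the stack.
theorem pvLoopA_concat (bd : PySem.Dict String (List String)) (s : List String) (d : String) (seen : PySem.Set String) :
    pvLoopA bd (s ++ [d]) seen =
      (if PySem.Set.contains seen d then pvLoopA bd s seen
       else match bd.get? d with
         | none => none
         | some ch => pvLoopA bd (s ++ ch) (PySem.Set.add seen d)) := by
  rw [pvLoopA.eq_def]
  split
  · next hL => rw [List.getLast?_concat] at hL; cases hL
  · next dep hL =>
    rw [List.getLast?_concat] at hL
    obtain rfl : d = dep := by injection hL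
    simp only [List.dropLast_concat]
    split_ifs with hcont
    · rfl
    · cases bd.get? d <;> rfl

theorem pv_bridge (bd : PySem.Dict String (List String)) :
    ∀ f : Nat,
      (∀ d seen out, pvVisitB bd f d seen = some out →
        ∀ s, pvLoopA bd (s ++ [d]) seen = pvLoopA bd s out) ∧
      (∀ l seen out, pvGoB bd f l seen = some out →
        ∀ s, pvLoopA bd (s ++ l.reverse) seen = pvLoopA bd s out) := by
  intro f
  induction f with
  | zero =>
    constructor
    · intro d seen out h; simp [pvVisitB] at h
    · intro l seen out h s
      cases l with
      | nil =>
        simp only [pvGoB, Option.some.injEq] at h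
        subst h; simp
      | cons d ds => simp [pvGoB, pvVisitB] at h
  | succ f ih =>
    have hv : ∀ d seen out, pvVisitB bd (f + 1) d seen = some out →
        ∀ s, pvLoopA bd (s ++ [d]) seen = pvLoopA bd s out := by
      intro d seen out h s
      rw [pvVisitB] at h
      by_cases hcont : PySem.Set.contains seen d = true
      · rw [if_pos hcont] at h
        obtain rfl : seen = out := by simpa using h
        rw [pvLoopA_concat, if_pos hcont]
      · rw [if_neg (by simpa using hcont)] at h
        cases hg : bd.get? d with
        | none => rw [hg] at h; cases h
        | some ch =>
          rw [hg] at h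
          have e1 := (ih.2) ch.reverse (PySem.Set.add seen d) out h s
          rw [List.reverse_reverse] at e1
          rw [pvLoopA_concat, if_neg (by simpa using hcont), hg]
          exact e1
    refine ⟨hv, ?_⟩
    intro l
    induction l with
    | nil =>
      intro seen out h s
      simp only [pvGoB, Option.some.injEq] at h
      subst h; simp
    | cons d ds ihl =>
      intro seen out h s
      rw [pvGoB] at h
      cases hvd : pvVisitB bd (f + 1) d seen with
      | none => rw [hvd] at h; cases h
      | some seen1 =>
        rw [hvd] at h
        calc pvLoopA bd (s ++ (d :: ds).reverse) seen
            = pvLoopA bd ((s ++ ds.reverse) ++ [d]) seen := by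
              simp [List.reverse_cons, List.append_assoc]
          _ = pvLoopA bd (s ++ ds.reverse) seen1 := hv d seen seen1 hvd (s ++ ds.reverse)
          _ = pvLoopA bd s out := ihl seen1 out h s

-- Sufficiency: with fuel above the number of unseen keys, the recursive traversal succeeds
-- (given every node it meets is a key), and the unseen count does not increase.
theorem pv_get?_mem (l : List (String × List String)) (k : String) (v : List String)
    (h : (PySem.Dict.mk l).get? k = some v) : (k, v) ∈ l := by
  simp only [PySem.Dict.get?, Option.map_eq_some_iff] at h
  obtain ⟨p, hp, hv⟩ := h
  have hmem := List.mem_of_find?_eq_some hp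
  have hpred := List.find?_some hp
  have hk : p.1 = k := by simpa using hpred
  have : p = (k, v) := by
    cases p; simp at hk hv ⊢; exact ⟨hk, hv⟩
  rw [← this]; exact hmem

theorem pv_suff (bd : PySem.Dict String (List String))
    (hclosed : ∀ k ch, bd.get? k = some ch → ∀ d ∈ ch, (bd.get? d).isSome = true) :
    ∀ f : Nat,
      (∀ d seen, (bd.get? d).isSome = true → pvUnseen bd seen < f →
        ∃ out, pvVisitB bd f d seen = some out ∧ pvUnseen bd out ≤ pvUnseen bd seen) ∧
      (∀ l seen, (∀ d ∈ l, (bd.get? d).isSome = true) → pvUnseen bd seen < f →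
        ∃ out, pvGoB bd f l seen = some out ∧ pvUnseen bd out ≤ pvUnseen bd seen) := by
  intro f
  induction f with
  | zero =>
    constructor
    · intro d seen _ hlt; exact absurd hlt (Nat.not_lt_zero _)
    · intro l seen _ hlt; exact absurd hlt (Nat.not_lt_zero _)
  | succ f ih =>
    have hv : ∀ d seen, (bd.get? d).isSome = true → pvUnseen bd seen < f + 1 →
        ∃ out, pvVisitB bd (f + 1) d seen = some out ∧ pvUnseen bd out ≤ pvUnseen bd seen := by
      intro d seen hsome hlt
      by_cases hcont : PySem.Set.contains seen d = true
      · exact ⟨seen, by rw [pvVisitB, if_pos hcont], le_refl _⟩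
      · cases hg : bd.get? d with
        | none => rw [hg] at hsome; cases hsome
        | some ch =>
          have hk : d ∈ bd.keys := pv_mem_keys_of_get? bd d ch hg
          have hdec := pvUnseen_add_lt bd seen d hk (by simpa using hcont)
          have hall : ∀ x ∈ ch.reverse, (bd.get? x).isSome = true := by
            intro x hx; exact hclosed d ch hg x (List.mem_reverse.mp hx)
          obtain ⟨out, hgo, hle⟩ := ih.2 ch.reverse (PySem.Set.add seen d) hall (by omega)
          refine ⟨out, ?_, by omega⟩
          rw [pvVisitB, if_neg (by simpa using hcont), hg]
          exact hgo
    refine ⟨hv, ?_⟩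
    intro l
    induction l with
    | nil => intro seen _ _; exact ⟨seen, by rw [pvGoB], le_refl _⟩
    | cons d ds ihl =>
      intro seen hall hlt
      obtain ⟨s1, hv1, hle1⟩ := hv d seen (hall d (List.mem_cons_self)) hlt
      obtain ⟨out, hgo, hle2⟩ := ihl s1 (fun x hx => hall x (List.mem_cons_of_mem _ hx)) (by omega)
      refine ⟨out, ?_, le_trans hle2 hle1⟩
      rw [pvGoB, hv1]
      exact hgo

-- ===== VERDICT (by name: the statement is the Claim_ definition above) =====
theorem get_all_deps_for_binary_spec : Claim_equal_get_all_deps_for_binary := by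
  intro key json _ hpre
  unfold Spec_get_all_deps_for_binary
  unfold Pre_get_all_deps_for_binary pvPreB at hpre
  unfold get_all_deps_for_binary get_all_deps_for_binary_alt
  cases hbd : (PySem.Dict.mk json).get? "binary_deps" with
  | none => rw [hbd] at hpre
  | some bdl =>
    rw [hbd] at hpre
    have hpre2 : (((PySem.Dict.mk bdl).get? key == none)
        || bdl.all (fun p => p.2.all fun d => ((PySem.Dict.mk bdl).get? d).isSome)) = true := hpre
    simp only [hbd]
    cases hkey : (PySem.Dict.mk bdl).get? key with
    | none => simp only [hkey]
    | some init =>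
      simp only [hkey]
      rw [hkey] at hpre2
      have hclosedb : ∀ p ∈ bdl, ∀ x ∈ p.2, ((PySem.Dict.mk bdl).get? x).isSome = true := by
        simp at hpre2
        intro p hp x hx
        exact hpre2 p.1 p.2 hp x hx
      have hclosed : ∀ k ch, (PySem.Dict.mk bdl).get? k = some ch →
          ∀ x ∈ ch, ((PySem.Dict.mk bdl).get? x).isSome = true := by
        intro k ch hg x hx
        exact hclosedb (k, ch) (pv_get?_mem bdl k ch hg) x hx
      have hinit : ∀ x ∈ init.reverse, ((PySem.Dict.mk bdl).get? x).isSome = true := by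
        intro x hx
        exact hclosed key init hkey x (List.mem_reverse.mp hx)
      have hcount : pvUnseen (PySem.Dict.mk bdl) PySem.Set.empty < bdl.length + 1 := by
        unfold pvUnseen
        simp [PySem.Set.contains, PySem.Set.empty, PySem.Dict.keys]
      obtain ⟨out, hgo, _⟩ :=
        (pv_suff (PySem.Dict.mk bdl) hclosed (bdl.length + 1)).2 init.reverse PySem.Set.empty hinit hcount
      have hb := (pv_bridge (PySem.Dict.mk bdl) (bdl.length + 1)).2 init.reverse PySem.Set.empty out hgo []
      rw [List.reverse_reverse, List.nil_append] at hb
      have hnil : pvLoopA (PySem.Dict.mk bdl) [] out = some out := by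
        rw [pvLoopA.eq_def]; rfl
      rw [hb, hnil, hgo]
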